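-- pv_equiv track=rewrite | github.com/gabriellaec/desoft-analise-exercicios | backup/user_009/ch178_2020_08_14_13_16_36_382980.py | junta_nomes
-- ===== SOURCE A (Python) =====
-- def junta_nomes(l1,l2,l3):
--     resultado = []
--     for i in l3:
--         for nome in l1:
--             if nome != '' and i != '':
--                 resultado.append([nome,i])
--         for nome in l2:
--             if nome != '' and i != '':
--                 resultado.append([nome,i])
--
--     return resultado
-- ===== SOURCE B (Python) =====
-- def junta_nomes(l1, l2, l3):
--     nomes = [n for n in l1 if n != ''] + [n for n in l2 if n != '']
--     itens = [i for i in l3 if i != '']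
--     ln = len(nomes)
--     return [[nomes[k % ln], itens[k // ln]] for k in range(len(itens) * ln)]
-- ===== Notes on version B (the rewrite author's own statement) =====
-- stated objective: alternative
-- what changed: B replaces A's nested loops with an arithmetical formulation of the Cartesian product: it builds the filtered name and item tables once and then emits pair k of the product by index arithmetic (nomes[k % ln], itens[k // ln]) in one flat loop over range(len(itens)*ln).
import Mathlib
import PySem

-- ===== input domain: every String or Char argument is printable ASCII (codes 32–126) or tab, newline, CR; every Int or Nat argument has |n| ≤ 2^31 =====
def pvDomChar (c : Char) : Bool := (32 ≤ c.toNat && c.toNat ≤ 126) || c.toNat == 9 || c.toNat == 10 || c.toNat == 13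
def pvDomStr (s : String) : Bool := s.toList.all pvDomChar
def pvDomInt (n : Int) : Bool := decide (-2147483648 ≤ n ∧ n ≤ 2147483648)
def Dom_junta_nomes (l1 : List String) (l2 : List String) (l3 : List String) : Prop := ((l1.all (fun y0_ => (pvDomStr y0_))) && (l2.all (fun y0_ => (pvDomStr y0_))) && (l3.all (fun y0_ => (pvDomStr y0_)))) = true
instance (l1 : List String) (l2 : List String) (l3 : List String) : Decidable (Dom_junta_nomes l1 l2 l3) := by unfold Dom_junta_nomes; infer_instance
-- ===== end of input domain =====

-- B replaces A's nested loops with index arithmetic over one flat range of the product size; objective: alternative.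


-- ===== PORT A =====
def junta_nomes (l1 : List String) (l2 : List String) (l3 : List String) : List (List String) :=
  l3.foldl (fun resultado i =>
    l2.foldl (fun r nome => if nome ≠ "" ∧ i ≠ "" then r ++ [[nome, i]] else r)
      (l1.foldl (fun r nome => if nome ≠ "" ∧ i ≠ "" then r ++ [[nome, i]] else r) resultado)) []

-- ===== PORT B =====
-- B: filter the name and item tables once, then one flat pass over range(len(itens)*ln)
-- emitting pair k as [nomes[k % ln], itens[k // ln]].  The indices are always in range,
-- so pyGetD with a dummy default is exact for Python's nomes[k % ln] / itens[k // ln].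
def junta_nomes_alt (l1 : List String) (l2 : List String) (l3 : List String) : List (List String) :=
  let nomes := l1.filter (fun n => n ≠ "") ++ l2.filter (fun n => n ≠ "")
  let itens := l3.filter (fun i => i ≠ "")
  let ln : Int := nomes.length
  (PySem.List.pyRange 0 ((itens.length : Int) * ln) 1).map
    (fun k => [PySem.List.pyGetD nomes (PySem.Int.mod k ln) "",
               PySem.List.pyGetD itens (PySem.Int.floordiv k ln) ""])

-- ===== PRECONDITION & SPEC =====
def Spec_junta_nomes (l1 : List String) (l2 : List String) (l3 : List String) (out : List (List String)) : Prop := out = junta_nomes_alt l1 l2 l3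
instance (l1 : List String) (l2 : List String) (l3 : List String) (out : List (List String)) : Decidable (Spec_junta_nomes l1 l2 l3 out) := by unfold Spec_junta_nomes; infer_instance

-- ===== CLAIM (what is proved, stated in full; the proofs are below) =====
def Claim_equal_junta_nomes : Prop := ∀ (l1 : List String) (l2 : List String) (l3 : List String), Dom_junta_nomes l1 l2 l3 → Spec_junta_nomes l1 l2 l3 (junta_nomes l1 l2 l3)

-- ===== LEMMAS AND PROOFS =====

-- A's inner loop for a fixed i appends the filtered pairs
theorem pv_inner (i : String) (l : List String) (acc : List (List String)) :
    l.foldl (fun r nome => if nome ≠ "" ∧ i ≠ "" then r ++ [[nome, i]] else r) acc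
      = acc ++ (if i = "" then [] else (l.filter (fun n => n ≠ "")).map (fun n => [n, i])) := by
  induction l generalizing acc with
  | nil => simp
  | cons h tl ih =>
    rw [List.foldl_cons, ih]
    by_cases hi : i = "" <;> by_cases hh : h = "" <;> simp [hi, hh]

-- A equals the flatMap (block) form of the product
theorem pv_outer (l1 l2 l3 : List String) (acc : List (List String)) :
    l3.foldl (fun resultado i =>
      l2.foldl (fun r nome => if nome ≠ "" ∧ i ≠ "" then r ++ [[nome, i]] else r)
        (l1.foldl (fun r nome => if nome ≠ "" ∧ i ≠ "" then r ++ [[nome, i]] else r) resultado)) acc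
      = acc ++ (l3.filter (fun i => i ≠ "")).flatMap
          (fun i => ((l1.filter (fun n => n ≠ "") ++ l2.filter (fun n => n ≠ "")).map (fun n => [n, i]))) := by
  induction l3 generalizing acc with
  | nil => simp
  | cons i tl ih =>
    rw [List.foldl_cons, ih, pv_inner, pv_inner]
    by_cases hi : i = "" <;> simp [hi, List.append_assoc]

-- flat index arithmetic over range (a*b) splits into blocks
theorem pv_rangeMul {α : Type} (a b : Nat) (f : Nat → Nat → α) :
    (List.range (a * b)).map (fun k => f (k / b) (k % b))
      = (List.range a).flatMap (fun q => (List.range b).map (fun r => f q r)) := by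
  induction a with
  | zero => simp
  | succ a ih =>
    rw [Nat.succ_mul, List.range_add, List.map_append, ih, List.range_succ,
        List.flatMap_append, List.map_map]
    congr 1
    simp only [List.flatMap_cons, List.flatMap_nil, List.append_nil]
    apply List.map_congr_left
    intro r hr
    have hrb : r < b := List.mem_range.mp hr
    have hb : 0 < b := Nat.lt_of_le_of_lt (Nat.zero_le r) hrb
    have hdiv : (r + a * b) / b = a := by
      rw [Nat.mul_comm a b, Nat.add_mul_div_left _ _ hb, Nat.div_eq_of_lt hrb, Nat.zero_add]
    simp [Function.comp, hdiv, Nat.mod_eq_of_lt hrb, Nat.add_comm]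

-- reading a list through range-of-its-length indices is the list itself (map form)
theorem pv_mapRangeGetD {α β : Type} [Inhabited α] (l : List α) (g : α → β) (d : α) :
    (List.range l.length).map (fun r => g (l.getD r d)) = l.map g := by
  apply List.ext_getElem
  · simp
  · intro n h1 h2
    simp only [List.length_map] at h2
    simp [List.getD, List.getElem?_eq_getElem h2]

-- flatMap through range-of-length indices is flatMap over the list
theorem pv_flatMapRangeGetD {α β : Type} [Inhabited α] (l : List α) (F : α → List β) (d : α) :
    (List.range l.length).flatMap (fun q => F (l.getD q d)) = l.flatMap F := by
  calc (List.range l.length).flatMap (fun q => F (l.getD q d))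
      = ((List.range l.length).map (fun q => F (l.getD q d))).flatten := by
        simp [List.flatMap_def]
    _ = (l.map F).flatten := by rw [pv_mapRangeGetD]
    _ = l.flatMap F := by simp [List.flatMap_def]

-- B's flat index-arithmetic pass equals the flatMap (block) form of the product
theorem pv_index_eq (ns its : List String) :
    (PySem.List.pyRange 0 ((its.length : Int) * (ns.length : Int)) 1).map
      (fun k => [PySem.List.pyGetD ns (PySem.Int.mod k (ns.length : Int)) "",
                 PySem.List.pyGetD its (PySem.Int.floordiv k (ns.length : Int)) ""])
    = its.flatMap (fun i => ns.map (fun n => [n, i])) := by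
  have hcast : (its.length : Int) * (ns.length : Int) = ((its.length * ns.length : Nat) : Int) := by
    push_cast; ring
  rw [hcast, PySem.List.pyRange_zero_natCast, List.map_map]
  have hpt : ∀ k ∈ List.range (its.length * ns.length),
      ((fun k => [PySem.List.pyGetD ns (PySem.Int.mod k (ns.length : Int)) "",
                  PySem.List.pyGetD its (PySem.Int.floordiv k (ns.length : Int)) ""]) ∘
        (fun k : Nat => (k : Int))) k
        = (fun k : Nat => [ns.getD (k % ns.length) "", its.getD (k / ns.length) ""]) k := by
    intro k _
    simp only [Function.comp_apply, PySem.Int.mod_natCast, PySem.Int.floordiv_natCast,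
      PySem.List.pyGetD_natCast]
  rw [List.map_congr_left hpt,
      pv_rangeMul its.length ns.length (fun q r => [ns.getD r "", its.getD q ""])]
  have hin : ∀ q ∈ List.range its.length,
      (List.range ns.length).map (fun r => [ns.getD r "", its.getD q ""])
        = (fun i => ns.map (fun n => [n, i])) (its.getD q "") := by
    intro q _
    exact pv_mapRangeGetD ns (fun n => [n, its.getD q ""]) ""
  rw [List.flatMap_congr hin]
  exact pv_flatMapRangeGetD its (fun i => ns.map (fun n => [n, i])) ""

-- B equals the flatMap (block) form
theorem pv_alt_eq (l1 l2 l3 : List String) :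
    junta_nomes_alt l1 l2 l3
      = (l3.filter (fun i => i ≠ "")).flatMap
          (fun i => ((l1.filter (fun n => n ≠ "") ++ l2.filter (fun n => n ≠ "")).map (fun n => [n, i]))) := by
  exact pv_index_eq (l1.filter (fun n => n ≠ "") ++ l2.filter (fun n => n ≠ "")) (l3.filter (fun i => i ≠ ""))

-- ===== VERDICT (by name: the statement is the Claim_ definition above) =====
theorem junta_nomes_spec : Claim_equal_junta_nomes := by
  intro l1 l2 l3 _
  show junta_nomes l1 l2 l3 = junta_nomes_alt l1 l2 l3
  rw [junta_nomes, pv_outer, List.nil_append, pv_alt_eq]
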